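-- pv_equiv track=rewrite | github.com/thisgary/tnpo | tnpo/main.py | draw_tree
-- ===== SOURCE A (Python) =====
-- def draw_tree(nodes):
--     nodes.sort()
--     tree, childs = [], []
--     c_parent = 0
--     for node in nodes:
--         parent, child = node
--         if childs:
--             if parent == c_parent: childs.append(child)
--             else:
--                 childs.sort()
--                 node = c_parent, childs
--                 tree.append(node)
--                 c_parent, childs = parent, [child]
--         else: c_parent, childs = parent, [child]
--     return tree
-- ===== SOURCE B (Python) =====
-- def draw_tree(nodes):
--     nodes.sort()
--     tree, run = [], []
--     for (parent, child), nxt in zip(nodes, nodes[1:]):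
--         run.append(child)
--         if nxt[0] != parent:
--             tree.append((parent, run))
--             run = []
--     return tree
-- ===== Notes on version B (the rewrite author's own statement) =====
-- stated objective: alternative
-- what changed: B replaces A's stateful look-behind loop (current parent, pending children, explicit flush and per-group childs.sort()) with a look-ahead pass over zip(nodes, nodes[1:]) of the sorted list, emitting a group wherever the next parent differs; the lexicographic sort makes per-group sorting unnecessary; B performs the same in-place nodes.sort() as A.
import Mathlib
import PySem

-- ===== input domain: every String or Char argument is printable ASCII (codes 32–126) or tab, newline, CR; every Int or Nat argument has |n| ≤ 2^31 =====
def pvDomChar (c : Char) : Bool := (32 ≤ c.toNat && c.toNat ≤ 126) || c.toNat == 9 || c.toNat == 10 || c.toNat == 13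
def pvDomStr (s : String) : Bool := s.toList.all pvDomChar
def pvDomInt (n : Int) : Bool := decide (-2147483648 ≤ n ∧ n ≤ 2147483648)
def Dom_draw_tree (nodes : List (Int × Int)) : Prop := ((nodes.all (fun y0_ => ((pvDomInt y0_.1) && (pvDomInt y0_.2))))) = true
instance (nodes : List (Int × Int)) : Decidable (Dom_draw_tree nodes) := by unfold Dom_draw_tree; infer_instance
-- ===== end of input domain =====

-- B replaces A's stateful look-behind accumulator (current parent, pending children, explicit
-- flush and per-group sort) with a look-ahead pass over adjacent pairs of the sorted list,
-- emitting a group where the next parent differs; both Pythons sort the argument list in place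
-- (same side effect); the equivalence proved here is about the return value.

-- ===== PORT A =====
-- loop body of A's for-loop: state = (tree, childs, c_parent)
def pvStepA (acc : List (Int × List Int) × List Int × Int) (node : Int × Int) :
    List (Int × List Int) × List Int × Int :=
  let tree := acc.1
  let childs := acc.2.1
  let c_parent := acc.2.2
  if childs ≠ [] then
    if node.1 == c_parent then (tree, childs ++ [node.2], c_parent)
    else (tree ++ [(c_parent, PySem.List.sorted childs (fun c => c))], [node.2], node.1)
  else (tree, [node.2], node.1)

def draw_tree (nodes : List (Int × Int)) : List (Int × List Int) :=
  ((PySem.List.sorted2 nodes (fun n => n.1) (fun n => n.2)).foldl pvStepA ([], [], 0)).1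

-- ===== PORT B =====
-- loop body of B's for-loop over zip(nodes, nodes[1:]): state = (tree, run)
def pvStepB (acc : List (Int × List Int) × List Int) (pr : (Int × Int) × (Int × Int)) :
    List (Int × List Int) × List Int :=
  let run := acc.2 ++ [pr.1.2]
  if pr.2.1 ≠ pr.1.1 then (acc.1 ++ [(pr.1.1, run)], []) else (acc.1, run)

def draw_tree_alt (nodes : List (Int × Int)) : List (Int × List Int) :=
  let s := PySem.List.sorted2 nodes (fun n => n.1) (fun n => n.2)
  ((s.zip (PySem.List.slice s (some 1) none)).foldl pvStepB ([], [])).1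

-- ===== PRECONDITION & SPEC =====
def Spec_draw_tree (nodes : List (Int × Int)) (out : List (Int × List Int)) : Prop := out = draw_tree_alt nodes
instance (nodes : List (Int × Int)) (out : List (Int × List Int)) : Decidable (Spec_draw_tree nodes out) := by unfold Spec_draw_tree; infer_instance

-- ===== CLAIM =====
def Claim_equal_draw_tree : Prop := ∀ (nodes : List (Int × Int)), Dom_draw_tree nodes → Spec_draw_tree nodes (draw_tree nodes)

-- ===== LEMMAS AND PROOFS =====

-- the comparison sorted2 uses for lexicographic (parent, child) order
def pvLexBefore (a b : Int × Int) : Bool :=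
  decide (a.1 < b.1) || (!decide (b.1 < a.1) && decide (a.2 < b.2))

theorem pvSorted2_eq (nodes : List (Int × Int)) :
    PySem.List.sorted2 nodes (fun n => n.1) (fun n => n.2) =
      nodes.foldl (fun acc x => PySem.List.insertBy pvLexBefore x acc) [] := rfl

theorem pvLexBefore_false_iff (a b : Int × Int) :
    pvLexBefore a b = false ↔ b.1 ≤ a.1 ∧ (b.1 < a.1 ∨ b.2 ≤ a.2) := by
  simp [pvLexBefore]; omega

theorem pvLexBefore_true_iff (a b : Int × Int) :
    pvLexBefore a b = true ↔ a.1 < b.1 ∨ (a.1 = b.1 ∧ a.2 < b.2) := by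
  simp [pvLexBefore]; omega

theorem pvPairwise_insertBy (x : Int × Int) (ys : List (Int × Int))
    (h : List.Pairwise (fun a b => pvLexBefore b a = false) ys) :
    List.Pairwise (fun a b => pvLexBefore b a = false) (PySem.List.insertBy pvLexBefore x ys) := by
  induction ys with
  | nil => simp [PySem.List.insertBy]
  | cons y ys ih =>
    rw [List.pairwise_cons] at h
    obtain ⟨hy, hys⟩ := h
    by_cases hxy : pvLexBefore x y = true
    · rw [show PySem.List.insertBy pvLexBefore x (y :: ys) = x :: y :: ys from by
        simp [PySem.List.insertBy, hxy]]
      refine List.Pairwise.cons ?_ (List.Pairwise.cons hy hys)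
      intro z hz
      rw [List.mem_cons] at hz
      rcases hz with hz | hz
      · subst hz
        rw [pvLexBefore_true_iff] at hxy
        rw [pvLexBefore_false_iff]
        omega
      · have := hy z hz
        rw [pvLexBefore_true_iff] at hxy
        rw [pvLexBefore_false_iff] at this ⊢
        omega
    · rw [show PySem.List.insertBy pvLexBefore x (y :: ys) =
          y :: PySem.List.insertBy pvLexBefore x ys from by
        simp [PySem.List.insertBy, hxy]]
      refine List.Pairwise.cons ?_ (ih hys)
      intro z hz
      rw [PySem.List.mem_insertBy] at hz
      rcases hz with hz | hz
      · subst hz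
        simpa using hxy
      · exact hy z hz

theorem pvPairwise_foldl_insertBy (xs : List (Int × Int)) :
    ∀ acc, List.Pairwise (fun a b => pvLexBefore b a = false) acc →
      List.Pairwise (fun a b => pvLexBefore b a = false)
        (xs.foldl (fun acc x => PySem.List.insertBy pvLexBefore x acc) acc) := by
  induction xs with
  | nil => intro acc h; simpa using h
  | cons x xs ih =>
    intro acc h
    exact ih _ (pvPairwise_insertBy x acc h)

theorem pvPairwise_sorted2 (nodes : List (Int × Int)) :
    List.Pairwise (fun a b => pvLexBefore b a = false)
      (PySem.List.sorted2 nodes (fun n => n.1) (fun n => n.2)) := by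
  rw [pvSorted2_eq]
  exact pvPairwise_foldl_insertBy nodes [] (by simp)

-- sorting an already nondecreasing list of ints is the identity
theorem pvSorted_of_pairwise (childs : List Int) (h : List.Pairwise (· ≤ ·) childs) :
    PySem.List.sorted childs (fun c => c) = childs := by
  refine PySem.List.eq_of_perm_of_pairwise_le_of_injective (fun c : Int => c)
    (fun a b hab => hab) (PySem.List.sorted_perm childs (fun c => c) false) ?_ h
  exact PySem.List.sorted_pairwise childs (fun c => c)

-- core correspondence: A's look-behind state (tree, run ++ [c], p) after consuming the element
-- (p, c) matches B's look-ahead state (tree, run) about to process the pairs zip ((p,c)::r) r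
theorem pvLoopAB (r : List (Int × Int)) :
    ∀ (tree : List (Int × List Int)) (run : List Int) (p c : Int),
    List.Pairwise (fun a b => pvLexBefore b a = false) ((p, c) :: r) →
    List.Pairwise (· ≤ ·) (run ++ [c]) →
    (r.foldl pvStepA (tree, run ++ [c], p)).1 =
      ((((p, c) :: r).zip r).foldl pvStepB (tree, run)).1 := by
  induction r with
  | nil => intro tree run p c _ _; simp
  | cons y r ih =>
    obtain ⟨y1, y2⟩ := y
    intro tree run p c hpw hrun
    rw [List.pairwise_cons] at hpw
    obtain ⟨hx, hpw'⟩ := hpw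
    have hxy := hx (y1, y2) List.mem_cons_self
    rw [pvLexBefore_false_iff] at hxy
    have hrc : ∀ z ∈ run, z ≤ c := by
      have := (List.pairwise_append.mp hrun).2.2
      intro z hz; simpa using this z hz (c) (by simp)
    have hzip : ((p, c) :: (y1, y2) :: r).zip ((y1, y2) :: r) = ((p, c), (y1, y2)) :: ((y1, y2) :: r).zip r := rfl
    by_cases hp : y1 = p
    · -- same parent: A appends y2 to childs, B appends to run, no flush
      subst hp
      have hA : pvStepA (tree, run ++ [c], y1) (y1, y2) = (tree, (run ++ [c]) ++ [y2], y1) := by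
        simp [pvStepA]
      have hB : pvStepB (tree, run) ((y1, c), (y1, y2)) = (tree, run ++ [c]) := by
        simp [pvStepB]
      have hc2 : c ≤ y2 := by simp at hxy; omega
      have hrun' : List.Pairwise (· ≤ ·) ((run ++ [c]) ++ [y2]) := by
        rw [List.pairwise_append]
        refine ⟨hrun, by simp, ?_⟩
        intro a ha b hb
        rw [List.mem_singleton] at hb; subst hb
        rcases List.mem_append.mp ha with h | h
        · have := hrc a h; omega
        · rw [List.mem_singleton] at h; omega
      rw [hzip, List.foldl_cons, List.foldl_cons, hA, hB]
      exact ih tree (run ++ [c]) y1 y2 hpw' hrun'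
    · -- new parent: A flushes (p, sorted childs), B flushes (p, run ++ [c])
      have hA : pvStepA (tree, run ++ [c], p) (y1, y2) =
          (tree ++ [(p, run ++ [c])], [y2], y1) := by
        simp [pvStepA, hp, pvSorted_of_pairwise _ hrun]
      have hB : pvStepB (tree, run) ((p, c), (y1, y2)) = (tree ++ [(p, run ++ [c])], []) := by
        simp [pvStepB, hp]
      rw [hzip, List.foldl_cons, List.foldl_cons, hA, hB]
      exact ih (tree ++ [(p, run ++ [c])]) [] y1 y2 hpw' (by simp)

-- ===== VERDICT (by name: the statement is the Claim_ definition above) =====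
theorem draw_tree_spec : Claim_equal_draw_tree := by
  intro nodes _
  unfold Spec_draw_tree draw_tree draw_tree_alt
  have hpw := pvPairwise_sorted2 nodes
  rcases hs : PySem.List.sorted2 nodes (fun n => n.1) (fun n => n.2) with _ | ⟨x, r⟩
  · simp
  · rw [hs] at hpw
    show (List.foldl pvStepA ([], [], 0) (x :: r)).1 =
      (List.foldl pvStepB ([], []) ((x :: r).zip (PySem.List.slice (x :: r) (some 1) none))).1
    rw [PySem.List.slice_from_one]
    rw [show (x :: r).tail = r from rfl, List.foldl_cons]
    have hA : pvStepA ([], [], 0) x = ([], [x.2], x.1) := by simp [pvStepA]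
    rw [hA]
    have := pvLoopAB r [] [] x.1 x.2 (by simpa using hpw) (by simp)
    simpa using this
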